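-- pv_equiv track=rewrite | github.com/LucasMartelloNogueira/UFF-IA-2023.1-robo-limpeza | gerar_tabuleiro.py | generate_matrix_fact
-- ===== SOURCE A (Python) =====
-- from typing import List, Tuple
--
-- def generate_matrix_fact(matrix: List[List[str]]) -> List[List[str]]:
--     n = len(matrix)
--     m = len(matrix[0])
--     m_aux = []
--
--     for i in range(n):
--         m_line = []
--         for j in range(m):
--             cell_id = i * m + j
--             m_line.append(f'v{cell_id}')
--         m_aux.append(m_line)
--
--     return m_aux
-- ===== SOURCE B (Python) =====
-- from typing import List, Tuple
--
-- def generate_matrix_fact(matrix: List[List[str]]) -> List[List[str]]: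
--     n = len(matrix)
--     m = len(matrix[0])
--     flat = [f'v{k}' for k in range(n * m)]
--     return [flat[i * m:(i + 1) * m] for i in range(n)]
-- ===== Notes on version B (the rewrite author's own statement) =====
-- stated objective: alternative
-- what changed: Replaces the nested loop computing i*m+j per cell with a single flat pass generating all n*m labels, then reshapes them into rows by slicing consecutive length-m chunks.
import Mathlib
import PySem

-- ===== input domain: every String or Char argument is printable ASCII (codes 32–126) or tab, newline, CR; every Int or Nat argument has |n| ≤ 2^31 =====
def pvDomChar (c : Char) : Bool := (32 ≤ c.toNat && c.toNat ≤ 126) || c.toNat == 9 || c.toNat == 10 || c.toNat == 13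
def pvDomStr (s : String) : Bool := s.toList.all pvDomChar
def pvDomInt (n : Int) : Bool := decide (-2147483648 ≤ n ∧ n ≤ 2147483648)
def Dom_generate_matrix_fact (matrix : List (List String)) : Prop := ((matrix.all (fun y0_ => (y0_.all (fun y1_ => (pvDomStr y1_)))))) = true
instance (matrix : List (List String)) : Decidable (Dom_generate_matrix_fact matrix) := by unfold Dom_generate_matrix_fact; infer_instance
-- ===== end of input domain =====

-- B separates label generation (one flat pass over range(n*m)) from row layout (length-m slices),
-- instead of A's nested loop computing i*m+j per cell; same cost, different decomposition.


-- ===== PORT A =====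
def generate_matrix_fact (matrix : List (List String)) : List (List String) :=
  let n : Int := matrix.length
  let m : Int := (matrix.headD []).length
  (PySem.List.pyRange 0 n 1).foldl
    (fun m_aux i =>
      m_aux ++ [(PySem.List.pyRange 0 m 1).foldl
        (fun m_line j => m_line ++ ["v" ++ PySem.Int.toStr (i * m + j)]) []])
    []

-- ===== PORT B =====
def generate_matrix_fact_alt (matrix : List (List String)) : List (List String) :=
  let n : Int := matrix.length
  let m : Int := (matrix.headD []).length
  let flat : List String := (PySem.List.pyRange 0 (n * m) 1).map (fun k => "v" ++ PySem.Int.toStr k)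
  (PySem.List.pyRange 0 n 1).map (fun i => PySem.List.slice flat (some (i * m)) (some ((i + 1) * m)))

-- ===== PRECONDITION & SPEC =====
-- Pre_: Python A raises IndexError on len(matrix[0]) when matrix is empty; those inputs are excluded.
def Pre_generate_matrix_fact (matrix : List (List String)) : Prop := matrix ≠ []
instance (matrix : List (List String)) : Decidable (Pre_generate_matrix_fact matrix) := by unfold Pre_generate_matrix_fact; infer_instance
def pvWitness_generate_matrix_fact : List (List String) := [["a", "b"], ["c", "d"]]
def Spec_generate_matrix_fact (matrix : List (List String)) (out : List (List String)) : Prop := out = generate_matrix_fact_alt matrix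
instance (matrix : List (List String)) (out : List (List String)) : Decidable (Spec_generate_matrix_fact matrix out) := by unfold Spec_generate_matrix_fact; infer_instance

-- ===== CLAIM (what is proved, stated in full; the proofs are below) =====
def Claim_equal_generate_matrix_fact : Prop := ∀ (matrix : List (List String)), Dom_generate_matrix_fact matrix → Pre_generate_matrix_fact matrix → Spec_generate_matrix_fact matrix (generate_matrix_fact matrix)

-- ===== LEMMAS AND PROOFS =====

-- A length-m slice of the flat label list at offset i*m is exactly A's i-th row.
theorem pv_chunk (g : Int → String) (i m n : Nat) (hi : i < n) :
    PySem.List.slice ((PySem.List.pyRange 0 ((n : Int) * (m : Int)) 1).map g)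
      (some ((i : Int) * (m : Int))) (some (((i : Int) + 1) * (m : Int)))
    = (PySem.List.pyRange 0 (m : Int) 1).map (fun j => g ((i : Int) * (m : Int) + j)) := by
  have him : i * m + m ≤ n * m := by
    calc i * m + m = (i + 1) * m := by ring
    _ ≤ n * m := Nat.mul_le_mul_right m hi
  rw [PySem.List.slice_toNat _ (by positivity) (by positivity)]
  rw [PySem.List.pyRange_one, PySem.List.pyRange_one]
  have e1 : (((i : Int) + 1) * (m : Int)).toNat = i * m + m := by norm_cast; ring
  have e2 : ((i : Int) * (m : Int)).toNat = i * m := by norm_cast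
  have e3 : (((n : Int) * (m : Int)) - 0).toNat = n * m := by rw [Int.sub_zero]; norm_cast
  have e4 : ((m : Int) - 0).toNat = m := by omega
  rw [e1, e2, e3, e4]
  apply List.ext_getElem
  · simp; omega
  · intro k h1 h2
    simp only [List.getElem_take, List.getElem_drop, List.getElem_map, List.getElem_range]
    congr 1
    push_cast
    ring

-- ===== VERDICT (by name: the statement is the Claim_ definition above) =====
theorem generate_matrix_fact_spec : Claim_equal_generate_matrix_fact := by
  intro matrix _ _
  unfold Spec_generate_matrix_fact generate_matrix_fact generate_matrix_fact_alt
  simp only [PySem.List.foldl_append_singleton_eq_map, List.nil_append]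
  refine List.map_congr_left ?_
  intro i hi
  rw [PySem.List.mem_pyRange_one] at hi
  obtain ⟨h0, hn⟩ := hi
  have hieq : i = ((i.toNat : Nat) : Int) := (Int.toNat_of_nonneg h0).symm
  rw [hieq]
  rw [pv_chunk (fun k => "v" ++ PySem.Int.toStr k) i.toNat (matrix.headD []).length matrix.length
    (by omega)]
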